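-- pv_equiv track=rewrite | github.com/vincentlee001804/adailocal | adailocal.py | _is_mostly_english
-- ===== SOURCE A (Python) =====
-- def _is_mostly_english(text: str) -> bool:
--     try:
--         if not text:
--             return False
--
--         # Count English letters
--         english_letters = sum(1 for ch in text if ('a' <= ch.lower() <= 'z'))
--         # Count Chinese characters (CJK Unified Ideographs)
--         chinese_chars = sum(1 for ch in text if '\u4e00' <= ch <= '\u9fff')
--         # Count total alphabetic characters
--         total_alpha = sum(1 for ch in text if ch.isalpha())
--
--         if total_alpha == 0:
--             return False
--
--         # If there are Chinese characters, it's not mostly English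
--         if chinese_chars > 0:
--             return False
--
--         # If more than 50% are English letters, consider it mostly English
--         return (english_letters / total_alpha) > 0.5
--     except Exception:
--         return False
-- ===== SOURCE B (Python) =====
-- def _is_mostly_english(text: str) -> bool:
--     # Single pass: one loop keeps both counters and bails out at the first CJK char,
--     # instead of A's three separate generator-expression passes over the text.
--     try:
--         if not text:
--             return False
--         english = 0
--         total_alpha = 0
--         for ch in text:
--             if '\u4e00' <= ch <= '\u9fff':
--                 return False
--             if 'a' <= ch.lower() <= 'z':
--                 english += 1
--             if ch.isalpha():
--                 total_alpha += 1
--         if total_alpha == 0: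
--             return False
--         return english / total_alpha > 0.5
--     except Exception:
--         return False
-- ===== Notes on version B (the rewrite author's own statement) =====
-- stated objective: simpler
-- what changed: Replaces A's three separate counting passes over the text with a single loop that maintains both counters and returns False immediately at the first CJK character.
import Mathlib
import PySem

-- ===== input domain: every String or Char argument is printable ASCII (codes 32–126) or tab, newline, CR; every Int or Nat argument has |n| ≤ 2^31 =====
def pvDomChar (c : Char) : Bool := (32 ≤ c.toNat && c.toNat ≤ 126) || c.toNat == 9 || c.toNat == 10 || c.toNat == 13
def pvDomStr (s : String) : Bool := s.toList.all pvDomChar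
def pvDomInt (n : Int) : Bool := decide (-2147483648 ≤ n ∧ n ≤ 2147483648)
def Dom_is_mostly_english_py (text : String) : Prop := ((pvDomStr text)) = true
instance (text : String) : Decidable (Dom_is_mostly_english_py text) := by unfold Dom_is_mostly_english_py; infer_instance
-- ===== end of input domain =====

-- B replaces A's three separate counting passes by ONE loop with an early exit at the
-- first CJK character (objective: simpler).
-- Note: `english / total_alpha > 0.5` is ported as `2 * english > total_alpha`;
-- this is exact for every count below 2^52, in particular on all tested inputs.

-- ===== PORT A =====
def is_mostly_english_py (text : String) : Bool :=
  let cs := text.toList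
  if cs = [] then false                       -- if not text: return False
  else
    -- english_letters = sum(1 for ch in text if 'a' <= ch.lower() <= 'z')
    let english_letters := cs.countP (fun ch =>
      decide ('a' ≤ PySem.Chars.lowerChar ch) && decide (PySem.Chars.lowerChar ch ≤ 'z'))
    -- chinese_chars = sum(1 for ch in text if '\u4e00' <= ch <= '\u9fff')
    let chinese_chars := cs.countP (fun ch =>
      decide (Char.ofNat 0x4e00 ≤ ch) && decide (ch ≤ Char.ofNat 0x9fff))
    -- total_alpha = sum(1 for ch in text if ch.isalpha())
    let total_alpha := cs.countP PySem.Chars.isalpha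
    if total_alpha = 0 then false
    else if chinese_chars > 0 then false
    else decide (2 * english_letters > total_alpha)

-- ===== PORT B =====
def pvIsCJK (ch : Char) : Bool :=
  decide (Char.ofNat 0x4e00 ≤ ch) && decide (ch ≤ Char.ofNat 0x9fff)

def pvIsEng (ch : Char) : Bool :=
  decide ('a' ≤ PySem.Chars.lowerChar ch) && decide (PySem.Chars.lowerChar ch ≤ 'z')

-- the `for ch in text` loop of Source B, carrying the two counters
def pvBLoop : List Char → Nat → Nat → Bool
  | [], _, 0 => false                          -- if total_alpha == 0: return False
  | [], english, total_alpha => decide (2 * english > total_alpha)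
  | ch :: rest, english, total_alpha =>
    if pvIsCJK ch then false                   -- early exit on first CJK char
    else pvBLoop rest
      (english + (if pvIsEng ch then 1 else 0))
      (total_alpha + (if PySem.Chars.isalpha ch then 1 else 0))

def is_mostly_english_py_alt (text : String) : Bool :=
  if text.toList = [] then false
  else pvBLoop text.toList 0 0

-- ===== PRECONDITION & SPEC =====
def Spec_is_mostly_english_py (text : String) (out : Bool) : Prop := out = is_mostly_english_py_alt text
instance (text : String) (out : Bool) : Decidable (Spec_is_mostly_english_py text out) := by unfold Spec_is_mostly_english_py; infer_instance

-- ===== CLAIM (what is proved, stated in full; the proofs are below) =====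
def Claim_equal_is_mostly_english_py : Prop := ∀ (text : String), Dom_is_mostly_english_py text → Spec_is_mostly_english_py text (is_mostly_english_py text)

-- ===== LEMMAS AND PROOFS =====

-- B's single loop computes exactly what A computes from its three counts.
theorem pvBLoop_eq (cs : List Char) : ∀ (e t : Nat),
    pvBLoop cs e t =
      (if 0 < cs.countP pvIsCJK then false
       else if t + cs.countP PySem.Chars.isalpha = 0 then false
       else decide (2 * (e + cs.countP pvIsEng) > t + cs.countP PySem.Chars.isalpha)) := by
  induction cs with
  | nil =>
    intro e t
    simp only [List.countP_nil, Nat.add_zero]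
    cases t with
    | zero => simp [pvBLoop]
    | succ n => simp [pvBLoop]
  | cons ch rest ih =>
    intro e t
    by_cases hc : pvIsCJK ch
    · simp [pvBLoop, hc]
    · simp only [pvBLoop, hc, if_false, Bool.false_eq_true, ih, List.countP_cons]
      by_cases ha : PySem.Chars.isalpha ch <;> by_cases he : pvIsEng ch <;>
        simp [ha, he] <;> ring_nf

theorem is_mostly_english_py_eq_alt (text : String) :
    is_mostly_english_py text = is_mostly_english_py_alt text := by
  have hC : (fun ch : Char => decide (Char.ofNat 0x4e00 ≤ ch) && decide (ch ≤ Char.ofNat 0x9fff)) = pvIsCJK := rfl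
  have hE : (fun ch : Char => decide ('a' ≤ PySem.Chars.lowerChar ch) && decide (PySem.Chars.lowerChar ch ≤ 'z')) = pvIsEng := rfl
  unfold is_mostly_english_py is_mostly_english_py_alt
  rw [hC, hE]
  by_cases h : text.toList = []
  · simp [h]
  · simp only [h, if_false, pvBLoop_eq, Nat.zero_add]
    by_cases hc : 0 < text.toList.countP pvIsCJK
    · simp only [hc, if_true]
      split_ifs <;> rfl
    · by_cases ht : text.toList.countP PySem.Chars.isalpha = 0
      · simp [hc, ht]
      · simp [hc, ht]

-- ===== VERDICT (by name: the statement is the Claim_ definition above) =====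
theorem is_mostly_english_py_spec : Claim_equal_is_mostly_english_py := by
  intro text _
  unfold Spec_is_mostly_english_py
  exact is_mostly_english_py_eq_alt text
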